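-- pv_equiv track=rewrite | github.com/Nooralwachi/sticks_cutting.py | sticks.py | stick_cutting4
-- ===== SOURCE A (Python) =====
-- from collections import Counter
-- from collections import Counter
-- from collections import Counter
--
-- def stick_cutting4(sticks):
--     answer=[]
--     result = Counter(sticks)
--     x= sum(result.values())
--     for k,v in sorted(result.items()):
--         answer.append(x)
--         x-=v
--     return(answer)
-- ===== SOURCE B (Python) =====
-- def stick_cutting4(sticks):
--     # One sorted pass over the full list: at each new distinct value the
--     # remaining-suffix length n - i is exactly the count of sticks still standing.
--     s = sorted(sticks)
--     n = len(s)
--     answer = []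
--     i = 0
--     while i < n:
--         answer.append(n - i)
--         v = s[i]
--         i += 1
--         while i < n and s[i] == v:
--             i += 1
--     return answer
-- ===== Notes on version B (the rewrite author's own statement) =====
-- stated objective: alternative
-- what changed: Replaces the Counter-plus-running-subtraction (build a frequency dict, sort its items, subtract each count from a running total) with a single scan over the fully sorted list that emits the remaining suffix length n-i at each group boundary and skips past equal values with a two-pointer advance.
import Mathlib
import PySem

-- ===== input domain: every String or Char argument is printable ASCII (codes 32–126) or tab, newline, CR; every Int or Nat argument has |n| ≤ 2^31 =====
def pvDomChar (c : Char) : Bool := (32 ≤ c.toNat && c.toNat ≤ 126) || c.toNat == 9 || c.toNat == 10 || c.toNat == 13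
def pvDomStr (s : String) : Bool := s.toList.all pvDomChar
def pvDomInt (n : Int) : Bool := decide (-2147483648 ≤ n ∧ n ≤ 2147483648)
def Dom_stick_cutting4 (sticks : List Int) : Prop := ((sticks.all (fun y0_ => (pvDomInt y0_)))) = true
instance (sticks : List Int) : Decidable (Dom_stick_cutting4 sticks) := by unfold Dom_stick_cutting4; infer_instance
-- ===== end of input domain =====

-- B replaces A's Counter + running subtraction with one scan of the sorted list
-- emitting the remaining-suffix length at each group boundary (objective: alternative).

-- ===== PORT A =====
-- answer=[]; result = Counter(sticks); x = sum(result.values());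
-- for k,v in sorted(result.items()): answer.append(x); x -= v
-- sorted(result.items()) compares (key, count) tuples; Counter keys are distinct,
-- so the tuple sort is exactly the sort by key — ported with key = fst (exact here).
def stick_cutting4 (sticks : List Int) : List Int :=
  let result := PySem.Dict.counter sticks
  let x : Int := result.values.sum
  let pairs := PySem.List.sorted result.items (fun kv => kv.1) false
  (pairs.foldl (fun (st : List Int × Int) kv => (st.1 ++ [st.2], st.2 - kv.2))
    (([] : List Int), x)).1

-- ===== PORT B =====
-- the inner 'while i < n and s[i] == v: i += 1' loop: skip past the head's run
def sc4Drop (v : Int) : List Int → List Int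
  | [] => []
  | x :: t => if x == v then sc4Drop v t else x :: t

theorem sc4Drop_length_le (v : Int) (t : List Int) : (sc4Drop v t).length ≤ t.length := by
  induction t with
  | nil => simp [sc4Drop]
  | cons x t ih =>
      simp only [sc4Drop]
      split
      · exact Nat.le_succ_of_le ih
      · simp

-- the outer 'while i < n' loop over the suffix s[i:]; n - i is the suffix length
def sc4Loop : List Int → List Int
  | [] => []
  | v :: t => ((t.length : Int) + 1) :: sc4Loop (sc4Drop v t)
  termination_by l => l.length
  decreasing_by simpa using Nat.lt_succ_of_le (sc4Drop_length_le v t)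

def stick_cutting4_alt (sticks : List Int) : List Int :=
  sc4Loop (PySem.List.sorted sticks (fun x => x) false)

-- ===== PRECONDITION & SPEC =====
def Spec_stick_cutting4 (sticks : List Int) (out : List Int) : Prop := out = stick_cutting4_alt sticks
instance (sticks : List Int) (out : List Int) : Decidable (Spec_stick_cutting4 sticks out) := by unfold Spec_stick_cutting4; infer_instance

-- ===== CLAIM (what is proved, stated in full; the proofs are below) =====
def Claim_equal_stick_cutting4 : Prop := ∀ (sticks : List Int), Dom_stick_cutting4 sticks → Spec_stick_cutting4 sticks (stick_cutting4 sticks)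

-- ===== LEMMAS AND PROOFS =====

-- A's for-loop as structural recursion over the sorted (key, count) pairs
def aLoop : List (Int × Int) → Int → List Int
  | [], _ => []
  | kv :: t, x => x :: aLoop t (x - kv.2)

theorem foldA (items : List (Int × Int)) (acc : List Int) (x : Int) :
    (items.foldl (fun (st : List Int × Int) kv => (st.1 ++ [st.2], st.2 - kv.2)) (acc, x)).1
      = acc ++ aLoop items x := by
  induction items generalizing acc x with
  | nil => simp [aLoop]
  | cons kv t ih =>
      rw [List.foldl_cons, ih]
      simp [aLoop]

theorem sc4Drop_eq_dropWhile (v : Int) (t : List Int) :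
    sc4Drop v t = t.dropWhile (fun x => x == v) := by
  induction t with
  | nil => rfl
  | cons x t ih =>
      simp only [sc4Drop, List.dropWhile_cons]
      split <;> simp_all

theorem sum_counts (xs : List Int) :
    ((PySem.Set.ofList xs).map (fun k => (xs.count k : Int))).sum = (xs.length : Int) := by
  have hperm : (PySem.Set.ofList xs).Perm xs.dedup := by
    apply List.perm_of_nodup_nodup_toFinset_eq (PySem.Set.nodup_ofList xs) xs.nodup_dedup
    ext k
    simp [PySem.Set.mem_ofList]
  have h1 : ((PySem.Set.ofList xs).map (fun k => xs.count k)).sum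
      = (xs.dedup.map (fun k => xs.count k)).sum := (hperm.map _).sum_eq
  have h2 : (xs.dedup.map (fun k => xs.count k)).sum = xs.length :=
    List.sum_map_count_dedup_eq_length xs
  have : ((PySem.Set.ofList xs).map (fun k => (xs.count k : Int))).sum
      = (((PySem.Set.ofList xs).map (fun k => xs.count k)).sum : Int) := by
    induction PySem.Set.ofList xs with
    | nil => simp
    | cons a l ih => simp [ih]
  rw [this, h1, h2]

-- main bridge: on a sorted list s, A's subtraction loop over any strictly
-- increasing enumeration ds of s's values equals B's suffix-length scan
theorem main_bridge : ∀ n (s ds : List Int), s.length = n → s.Pairwise (· ≤ ·) →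
    ds.Pairwise (· < ·) → (∀ k, k ∈ ds ↔ k ∈ s) →
    aLoop (ds.map (fun k => (k, (s.count k : Int)))) (s.length : Int) = sc4Loop s := by
  intro n
  induction n using Nat.strong_induction_on with
  | _ n ih =>
    intro s ds hlen hs hds hmem
    match s, ds with
    | [], [] => simp [aLoop, sc4Loop]
    | [], d :: ds' => exact absurd ((hmem d).mp (by simp)) (by simp)
    | v :: t, ds =>
      -- decompose t into the run of v's and the strictly larger rest
      set w := t.takeWhile (fun x => x == v) with hw
      set t' := t.dropWhile (fun x => x == v) with ht'
      have htsplit : w ++ t' = t := List.takeWhile_append_dropWhile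
      have hwv : ∀ x ∈ w, x = v := by
        intro x hx
        have := List.mem_takeWhile_imp hx
        simpa using this
      have hvt : ∀ x ∈ t, v ≤ x := (List.pairwise_cons.mp hs).1
      have ht'sub : ∀ x ∈ t', x ∈ t := fun x hx => by
        rw [← htsplit]; exact List.mem_append_right _ hx
      have ht'sorted : t'.Pairwise (· ≤ ·) :=
        List.Pairwise.sublist (List.dropWhile_sublist _) (List.pairwise_cons.mp hs).2
      have ht'gt : ∀ x ∈ t', v < x := by
        intro x hx
        match hh : t' with
        | [] => simp at hx
        | y :: r =>
          have hne : y ≠ v := by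
            have h0 := List.head?_dropWhile_not (fun x => x == v) t
            rw [← ht'] at h0
            simpa using h0
          have hyv : v < y := lt_of_le_of_ne (hvt y (ht'sub y (by simp))) (Ne.symm hne)
          rcases (by simpa [hh] using hx : x = y ∨ x ∈ r) with h | h
          · omega
          · have : y ≤ x := (List.pairwise_cons.mp (hh ▸ ht'sorted)).1 x h
            omega
      -- ds must start with v
      match ds with
      | [] => exact absurd ((hmem v).mpr (by simp)) (by simp)
      | d :: ds' =>
        have hd : d = v := by
          have hdmem : d ∈ v :: t := (hmem d).mp (by simp)
          have hvd : v ≤ d := by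
            rcases (by simpa using hdmem : d = v ∨ d ∈ t) with h | h
            · omega
            · exact hvt d h
          rcases (by simpa using (hmem v).mpr (by simp) : v = d ∨ v ∈ ds') with h | h
          · omega
          · have := (List.pairwise_cons.mp hds).1 v h; omega
        subst hd
        have hds' : ds'.Pairwise (· < ·) := (List.pairwise_cons.mp hds).2
        have hds'gt : ∀ k ∈ ds', d < k := (List.pairwise_cons.mp hds).1
        have hmem' : ∀ k, k ∈ ds' ↔ k ∈ t' := by
          intro k
          constructor
          · intro hk
            have hkgt := hds'gt k hk
            have : k ∈ d :: t := (hmem k).mp (by simp [hk])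
            rcases (by simpa using this) with h | h
            · omega
            · rw [← htsplit] at h
              rcases List.mem_append.mp h with h | h
              · exact absurd (hwv k h) (by omega)
              · exact h
          · intro hk
            have : k ∈ d :: ds' := (hmem k).mpr (by simp [ht'sub k hk])
            rcases (by simpa using this) with h | h
            · exact absurd h (by have := ht'gt k hk; omega)
            · exact h
        -- counts
        have hcount_gt : ∀ k, d < k → (d :: t).count k = t'.count k := by
          intro k hk
          rw [← htsplit, List.count_cons]
          have : w.count k = 0 := by
            rw [List.count_eq_zero]
            intro h; exact absurd (hwv k h) (by omega)
          have hkd : ¬ d = k := by omega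
          simp [List.count_append, this, hkd]
        have hcount_d : (d :: t).count d = w.length + 1 := by
          rw [← htsplit, List.count_cons]
          have h1 : w.count d = w.length := by
            rw [List.count_eq_length]; intro a ha; exact ((hwv a ha).symm)
          have h2 : t'.count d = 0 := by
            rw [List.count_eq_zero]; intro h; exact absurd (ht'gt d h) (by omega)
          simp [List.count_append, h1, h2]
        have hdrop : sc4Drop d t = t' := sc4Drop_eq_dropWhile d t
        have hlen' : (d :: t).length = w.length + 1 + t'.length := by
          simp [← htsplit]; omega
        -- assemble
        rw [sc4Loop, hdrop]
        simp only [List.map_cons, aLoop, List.cons.injEq]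
        refine ⟨by simp, ?_⟩
        have hmapeq : ds'.map (fun k => (k, ((d :: t).count k : Int)))
            = ds'.map (fun k => (k, (t'.count k : Int))) := by
          apply List.map_congr_left
          intro k hk
          rw [hcount_gt k (hds'gt k hk)]
        have hxeq : ((d :: t).length : Int) - ((d :: t).count d : Int) = (t'.length : Int) := by
          rw [hcount_d, hlen']; push_cast; ring
        rw [hmapeq, hxeq]
        exact ih t'.length (by
            have hle := sc4Drop_length_le d t
            rw [hdrop] at hle
            omega)
          t' ds' rfl ht'sorted hds' hmem'

-- ===== VERDICT (by name: the statement is the Claim_ definition above) =====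
theorem stick_cutting4_spec : Claim_equal_stick_cutting4 := by
  intro sticks _
  unfold Spec_stick_cutting4 stick_cutting4 stick_cutting4_alt
  dsimp only
  set s := PySem.List.sorted sticks (fun x => x) false with hsdef
  set ys := PySem.List.sorted (PySem.Set.ofList sticks) (fun x => x) false with hysdef
  have hsperm : s.Perm sticks := PySem.List.sorted_perm sticks _ _
  -- sorted(result.items()) is ys paired with the counts
  have hpairs : PySem.List.sorted (PySem.Dict.counter sticks).items (fun kv => kv.1) false
      = ys.map (fun k => (k, (sticks.count k : Int))) := by
    apply PySem.List.sorted_eq_of_perm_of_pairwise_lt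
    · rw [PySem.Dict.items_counter]
      exact (PySem.List.sorted_perm _ _ _).map _
    · exact (PySem.List.sorted_ofList_pairwise_lt sticks).map _ (by intro a b h; exact h)
  -- sum(result.values()) = len(sticks)
  have hsum : (PySem.Dict.counter sticks).values.sum = (sticks.length : Int) := by
    have : (PySem.Dict.counter sticks).values
        = (PySem.Set.ofList sticks).map (fun k => (sticks.count k : Int)) := by
      show (PySem.Dict.counter sticks).items.map (·.2) = _
      rw [PySem.Dict.items_counter, List.map_map]
      rfl
    rw [this, sum_counts]
  rw [hpairs, hsum, foldA, List.nil_append]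
  have hcnt : (fun k => (k, (sticks.count k : Int))) = (fun k => (k, (s.count k : Int))) := by
    funext k
    rw [hsperm.count_eq]
  rw [hcnt, (by exact_mod_cast hsperm.length_eq.symm : (sticks.length : Int) = (s.length : Int))]
  exact main_bridge s.length s ys rfl
    (by simpa using PySem.List.sorted_pairwise sticks (fun x => x))
    (PySem.List.sorted_ofList_pairwise_lt sticks)
    (by intro k; rw [hysdef, PySem.List.mem_sorted, PySem.Set.mem_ofList, hsdef, PySem.List.mem_sorted])
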